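-- pv_equiv track=rewrite | github.com/gaddonif/tesi-magistrale-gaddoni | codice/enumerate2.py | enumerate_rect_better
-- ===== SOURCE A (Python) =====
-- def enumerate_rect_better(matrice):
--     n = len(matrice)
--     m = len(matrice[0])
--
--     contatore = 0
--     dizionario = {}
--
--     for r_start in range(n):
--
--         valido_colonne = [1] * m  # tutte valide all'inizio
--
--         for r_end in range(r_start, n):
--
--             # aggiorna colonne valide
--             for j in range(m):
--                 if matrice[r_end][j] == 0:
--                     valido_colonne[j] = 0
--
--             # ora trova segmenti continui di colonne valide
--             j = 0
--             while j < m: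
--                 if valido_colonne[j] == 1:
--                     start = j
--
--                     while j < m and valido_colonne[j] == 1:
--                         j += 1
--
--                     end = j - 1
--
--                     # genera tutti i sottorettangoli orizzontali
--                     for c_start in range(start, end + 1):
--                         for c_end in range(c_start, end + 1):
--
--                             contatore += 1
--                             nome = f"S{contatore}"
--
--                             sottomatrice = []
--                             for i in range(r_start, r_end + 1):
--                                 riga = matrice[i][c_start:c_end + 1]
--                                 sottomatrice.append(riga)
--
--                             dizionario[nome] = sottomatrice
--                 else:
--                     j += 1
--
--     return contatore, dizionario
-- ===== SOURCE B (Python) =====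
-- def enumerate_rect_better(matrice):
--     n = len(matrice)
--     m = len(matrice[0])
--
--     contatore = 0
--     dizionario = {}
--
--     for r_start in range(n):
--         valido_colonne = [1] * m
--         for r_end in range(r_start, n):
--             for j in range(m):
--                 if matrice[r_end][j] == 0:
--                     valido_colonne[j] = 0
--             # brute-force column pairs: a (c_start, c_end) rectangle is valid
--             # iff every column in between is still valid
--             for c_start in range(m):
--                 for c_end in range(c_start, m):
--                     if all(valido_colonne[c] == 1 for c in range(c_start, c_end + 1)):
--                         contatore += 1
--                         dizionario["S" + str(contatore)] = [
--                             riga[c_start:c_end + 1]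
--                             for riga in matrice[r_start:r_end + 1]
--                         ]
--
--     return contatore, dizionario
-- ===== Notes on version B (the rewrite author's own statement) =====
-- stated objective: alternative
-- what changed: The inner while-loop detection of maximal runs of valid columns is replaced by a direct brute-force enumeration of all (c_start, c_end) column pairs guarded by an all-ones test, and the submatrix is built by slicing matrice[r_start:r_end+1] instead of an explicit index loop.
import Mathlib
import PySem

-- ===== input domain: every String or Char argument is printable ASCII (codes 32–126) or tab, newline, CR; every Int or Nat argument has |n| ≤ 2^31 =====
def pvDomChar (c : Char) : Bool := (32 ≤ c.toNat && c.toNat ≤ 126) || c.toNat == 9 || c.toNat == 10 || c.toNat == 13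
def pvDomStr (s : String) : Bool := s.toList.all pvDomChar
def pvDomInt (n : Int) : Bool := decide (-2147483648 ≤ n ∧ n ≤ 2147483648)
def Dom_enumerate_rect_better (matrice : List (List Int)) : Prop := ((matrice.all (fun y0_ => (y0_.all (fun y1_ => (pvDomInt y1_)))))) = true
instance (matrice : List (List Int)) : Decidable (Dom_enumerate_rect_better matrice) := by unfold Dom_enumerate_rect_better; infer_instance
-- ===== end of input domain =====

-- B replaces A's while-loop detection of maximal runs of valid columns by a brute-force
-- test of every (c_start, c_end) column pair; the enumeration order is proved identical.

-- ===== PORT A =====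
-- body of A's innermost emission: contatore += 1; nome = f"S{contatore}"; build sottomatrice row by row; store it
def pvEmitA (matrice : List (List Int)) (r_start r_end c_start c_end : Int)
    (st : Int × PySem.Dict String (List (List Int))) : Int × PySem.Dict String (List (List Int)) :=
  let contatore := st.1 + 1
  let nome := "S" ++ PySem.Int.toStr contatore
  -- matrice[i]: 0 ≤ r_start ≤ i ≤ r_end < len(matrice) at every call site, so pyGetD is exact
  let sottomatrice := (PySem.List.pyRange r_start (r_end + 1)).foldl
      (fun acc i => acc ++ [PySem.List.slice (PySem.List.pyGetD matrice i []) (some c_start) (some (c_end + 1))]) []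
  (contatore, st.2.insert nome sottomatrice)

-- inner 'while j < m and valido_colonne[j] == 1: j += 1'
def pvScanA (valido : List Int) (m : Nat) (j : Nat) : Nat :=
  if _h : j < m then
    if PySem.List.pyGetD valido (j : Int) 0 = 1 then pvScanA valido m (j + 1) else j
  else j
termination_by m - j

-- termination facts for pvColsA (cited by its decreasing_by)
lemma pvScanA_ge (valido : List Int) (m j : Nat) : j ≤ pvScanA valido m j := by
  induction j using pvScanA.induct valido m with
  | case1 x hx h1 ih => rw [pvScanA, dif_pos hx, if_pos h1]; omega
  | case2 x hx h1 => rw [pvScanA, dif_pos hx, if_neg h1]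
  | case3 x hx => rw [pvScanA, dif_neg hx]

lemma pvScanA_gt (valido : List Int) (m j : Nat) (h : j < m)
    (h1 : PySem.List.pyGetD valido (j : Int) 0 = 1) : j < pvScanA valido m j := by
  have := pvScanA_ge valido m (j + 1)
  rw [pvScanA, dif_pos h, if_pos h1]; omega

-- outer 'while j < m' of A: detect a maximal run of valid columns, emit all its rectangles, continue after it
def pvColsA (matrice : List (List Int)) (r_start r_end : Int) (valido : List Int) (m : Nat)
    (j : Nat) (st : Int × PySem.Dict String (List (List Int))) : Int × PySem.Dict String (List (List Int)) :=
  if h : j < m then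
    if h1 : PySem.List.pyGetD valido (j : Int) 0 = 1 then
      let start := j
      let j2 := pvScanA valido m j
      let endd := j2 - 1
      let st2 := (PySem.List.pyRange (start : Int) ((endd : Int) + 1)).foldl
        (fun st c_start => (PySem.List.pyRange c_start ((endd : Int) + 1)).foldl
          (fun st c_end => pvEmitA matrice r_start r_end c_start c_end st) st) st
      pvColsA matrice r_start r_end valido m j2 st2
    else pvColsA matrice r_start r_end valido m (j + 1) st
  else st
termination_by m - j
decreasing_by
  · have := pvScanA_gt valido m j h h1; omega
  · omega

def enumerate_rect_better (matrice : List (List Int)) : Int × (List (String × List (List Int))) :=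
  let n := matrice.length
  -- matrice[0]: Python raises IndexError on the empty matrix, excluded by Pre_
  let m := (PySem.List.pyGetD matrice 0 []).length
  let res := (PySem.List.pyRange 0 (n : Int)).foldl (fun st r_start =>
      let valido0 := List.replicate m (1 : Int)
      ((PySem.List.pyRange r_start (n : Int)).foldl
        (fun (p : List Int × (Int × PySem.Dict String (List (List Int)))) r_end =>
          -- matrice[r_end][j]: Python raises IndexError when a row is shorter than m, excluded by Pre_
          let valido := (PySem.List.pyRange 0 ((m : Nat) : Int)).foldl
            (fun v j => if PySem.List.pyGetD (PySem.List.pyGetD matrice r_end []) j 0 = 0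
                        then PySem.List.pySetD v j 0 else v) p.1
          (valido, pvColsA matrice r_start r_end valido m 0 p.2))
        (valido0, st)).2)
    ((0 : Int), PySem.Dict.empty)
  (res.1, res.2.items)

-- ===== PORT B =====
-- body of B's emission: the submatrix is built by slicing matrice[r_start:r_end+1]
def pvEmitB (matrice : List (List Int)) (r_start r_end c_start c_end : Int)
    (st : Int × PySem.Dict String (List (List Int))) : Int × PySem.Dict String (List (List Int)) :=
  let contatore := st.1 + 1
  let nome := "S" ++ PySem.Int.toStr contatore
  let sottomatrice := (PySem.List.slice matrice (some r_start) (some (r_end + 1))).map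
      (fun riga => PySem.List.slice riga (some c_start) (some (c_end + 1)))
  (contatore, st.2.insert nome sottomatrice)

-- B's brute-force double loop over all column pairs, guarded by the all-ones test
def pvColsB (matrice : List (List Int)) (r_start r_end : Int) (valido : List Int) (m : Nat)
    (st : Int × PySem.Dict String (List (List Int))) : Int × PySem.Dict String (List (List Int)) :=
  (PySem.List.pyRange 0 ((m : Nat) : Int)).foldl (fun st c_start =>
    (PySem.List.pyRange c_start ((m : Nat) : Int)).foldl (fun st c_end =>
      if (PySem.List.pyRange c_start (c_end + 1)).all
           (fun c => decide (PySem.List.pyGetD valido c 0 = 1))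
      then pvEmitB matrice r_start r_end c_start c_end st else st) st) st

def enumerate_rect_better_alt (matrice : List (List Int)) : Int × (List (String × List (List Int))) :=
  let n := matrice.length
  let m := (PySem.List.pyGetD matrice 0 []).length
  let res := (PySem.List.pyRange 0 (n : Int)).foldl (fun st r_start =>
      let valido0 := List.replicate m (1 : Int)
      ((PySem.List.pyRange r_start (n : Int)).foldl
        (fun (p : List Int × (Int × PySem.Dict String (List (List Int)))) r_end =>
          let valido := (PySem.List.pyRange 0 ((m : Nat) : Int)).foldl
            (fun v j => if PySem.List.pyGetD (PySem.List.pyGetD matrice r_end []) j 0 = 0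
                        then PySem.List.pySetD v j 0 else v) p.1
          (valido, pvColsB matrice r_start r_end valido m p.2))
        (valido0, st)).2)
    ((0 : Int), PySem.Dict.empty)
  (res.1, res.2.items)

-- ===== PRECONDITION & SPEC =====
-- Pre_ excludes exactly the inputs where Python A raises IndexError: the empty matrix
-- (matrice[0]) and matrices with some row shorter than the first row (matrice[r_end][j], j < m).
def Pre_enumerate_rect_better (matrice : List (List Int)) : Prop :=
  matrice ≠ [] ∧ ∀ row ∈ matrice, (PySem.List.pyGetD matrice 0 []).length ≤ row.length
instance (matrice : List (List Int)) : Decidable (Pre_enumerate_rect_better matrice) := by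
  unfold Pre_enumerate_rect_better; infer_instance

def pvWitness_enumerate_rect_better : List (List Int) := [[1, 0], [1, 1]]

def Spec_enumerate_rect_better (matrice : List (List Int)) (out : Int × (List (String × List (List Int)))) : Prop := out = enumerate_rect_better_alt matrice
instance (matrice : List (List Int)) (out : Int × (List (String × List (List Int)))) : Decidable (Spec_enumerate_rect_better matrice out) := by unfold Spec_enumerate_rect_better; infer_instance

-- ===== CLAIM (what is proved, stated in full; the proofs are below) =====
def Claim_equal_enumerate_rect_better : Prop := ∀ (matrice : List (List Int)), Dom_enumerate_rect_better matrice → Pre_enumerate_rect_better matrice → Spec_enumerate_rect_better matrice (enumerate_rect_better matrice)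

-- ===== LEMMAS AND PROOFS =====
lemma pvMapGetD_eq_slice {α : Type} (xs : List α) (d : α) (a b : Int)
    (h0 : 0 ≤ a) (hab : a ≤ b) (hb : b ≤ (xs.length : Int)) :
    (PySem.List.pyRange a b).map (fun i => PySem.List.pyGetD xs i d)
      = PySem.List.slice xs (some a) (some b) := by
  rw [PySem.List.slice_toNat xs h0 (by omega), PySem.List.pyRange_one]
  apply List.ext_getElem
  · simp; omega
  · intro i hL hR
    simp only [List.map_map, List.getElem_map, List.getElem_range, List.getElem_take,
      List.getElem_drop, Function.comp]
    simp only [List.length_map, List.length_range] at hL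
    rw [PySem.List.pyGetD_eq_getElem xs d (by omega) (by omega)]
    congr 1
    omega

lemma pvEmit_eq (matrice : List (List Int)) (r_start r_end c_start c_end : Int)
    (st : Int × PySem.Dict String (List (List Int)))
    (h0 : 0 ≤ r_start) (h1 : r_start ≤ r_end + 1) (h2 : r_end < (matrice.length : Int)) :
    pvEmitA matrice r_start r_end c_start c_end st = pvEmitB matrice r_start r_end c_start c_end st := by
  simp only [pvEmitA, pvEmitB]
  rw [PySem.List.foldl_append_singleton_eq_map, List.nil_append,
    ← pvMapGetD_eq_slice matrice [] r_start (r_end + 1) h0 h1 (by omega), List.map_map]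
  rfl

-- inner body of B's double loop (proof-local abbreviation)

lemma pvColsB_col_run (matrice : List (List Int)) (rs re : Int) (valido : List Int) (m : Nat)
    (j j2 : Nat) (cs : Int)
    (hones : ∀ k : Nat, j ≤ k → k < j2 → PySem.List.pyGetD valido (k : Int) 0 = 1)
    (hstop : j2 = m ∨ PySem.List.pyGetD valido ((j2 : Nat) : Int) 0 ≠ 1)
    (hj2m : j2 ≤ m) (hcs1 : (j : Int) ≤ cs) (hcs2 : cs < (j2 : Int))
    (st : Int × PySem.Dict String (List (List Int))) :
    (PySem.List.pyRange cs ((m : Nat) : Int)).foldl (fun st ce =>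
        if (PySem.List.pyRange cs (ce + 1)).all (fun c => decide (PySem.List.pyGetD valido c 0 = 1))
        then pvEmitB matrice rs re cs ce st else st) st
      = (PySem.List.pyRange cs ((j2 : Nat) : Int)).foldl (fun st ce => pvEmitB matrice rs re cs ce st) st := by
  rw [PySem.List.pyRange_one_append cs ((j2 : Nat) : Int) ((m : Nat) : Int) (le_of_lt hcs2)
    (by exact_mod_cast hj2m), List.foldl_append]
  rw [PySem.List.foldl_congr_mem _ _ (fun st ce => pvEmitB matrice rs re cs ce st) st ?htrue]
  rw [PySem.List.foldl_congr_mem _ _ (fun st _ => st) _ ?hfalse, List.foldl_fixed]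
  case htrue =>
    intro acc ce hce
    rw [PySem.List.mem_pyRange_one] at hce
    rw [if_pos]
    rw [List.all_eq_true]
    intro c hc
    rw [PySem.List.mem_pyRange_one] at hc
    have hc0 : 0 ≤ c := le_trans (le_trans (Int.natCast_nonneg j) hcs1) hc.1
    obtain ⟨k, rfl⟩ := Int.eq_ofNat_of_zero_le hc0
    simp only [decide_eq_true_eq]
    exact hones k (by omega) (by omega)
  case hfalse =>
    intro acc ce hce
    rw [PySem.List.mem_pyRange_one] at hce
    rw [if_neg]
    intro hall
    rw [List.all_eq_true] at hall
    have hmem : ((j2 : Nat) : Int) ∈ PySem.List.pyRange cs (ce + 1) :=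
      PySem.List.mem_pyRange_one.2 ⟨le_of_lt hcs2, by omega⟩
    have := hall _ hmem
    simp only [decide_eq_true_eq] at this
    rcases hstop with h | h
    · omega
    · exact h this

lemma pvColsB_col_dead (matrice : List (List Int)) (rs re : Int) (valido : List Int) (m : Nat)
    (x : Nat) (hx : ¬ PySem.List.pyGetD valido ((x : Nat) : Int) 0 = 1)
    (st : Int × PySem.Dict String (List (List Int))) :
    (PySem.List.pyRange ((x : Nat) : Int) ((m : Nat) : Int)).foldl (fun st ce =>
        if (PySem.List.pyRange ((x : Nat) : Int) (ce + 1)).all (fun c => decide (PySem.List.pyGetD valido c 0 = 1))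
        then pvEmitB matrice rs re ((x : Nat) : Int) ce st else st) st = st := by
  rw [PySem.List.foldl_congr_mem _ _ (fun st _ => st) _ ?hfalse, List.foldl_fixed]
  case hfalse =>
    intro acc ce hce
    rw [PySem.List.mem_pyRange_one] at hce
    rw [if_neg]
    intro hall
    rw [List.all_eq_true] at hall
    have hmem : ((x : Nat) : Int) ∈ PySem.List.pyRange ((x : Nat) : Int) (ce + 1) :=
      PySem.List.mem_pyRange_one.2 ⟨le_refl _, by omega⟩
    have := hall _ hmem
    simp only [decide_eq_true_eq] at this
    exact hx this

lemma pvScanA_le (valido : List Int) (m j : Nat) (h : j ≤ m) : pvScanA valido m j ≤ m := by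
  induction j using pvScanA.induct valido m with
  | case1 x hx h1 ih => rw [pvScanA, dif_pos hx, if_pos h1]; exact ih (by omega)
  | case2 x hx h1 => rw [pvScanA, dif_pos hx, if_neg h1]; omega
  | case3 x hx => rw [pvScanA, dif_neg hx]; omega

lemma pvScanA_ones (valido : List Int) (m j : Nat) :
    ∀ k : Nat, j ≤ k → k < pvScanA valido m j → PySem.List.pyGetD valido (k : Int) 0 = 1 := by
  induction j using pvScanA.induct valido m with
  | case1 x hx h1 ih =>
      intro k hk1 hk2
      rw [pvScanA, dif_pos hx, if_pos h1] at hk2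
      rcases Nat.eq_or_lt_of_le hk1 with rfl | hlt
      · exact h1
      · exact ih k hlt hk2
  | case2 x hx h1 => intro k hk1 hk2; rw [pvScanA, dif_pos hx, if_neg h1] at hk2; omega
  | case3 x hx => intro k hk1 hk2; rw [pvScanA, dif_neg hx] at hk2; omega

lemma pvScanA_stop (valido : List Int) (m j : Nat) (h : j < m) :
    pvScanA valido m j = m ∨ ¬ PySem.List.pyGetD valido ((pvScanA valido m j : Nat) : Int) 0 = 1 := by
  induction j using pvScanA.induct valido m with
  | case1 x hx h1 ih =>
      rw [pvScanA, dif_pos hx, if_pos h1]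
      rcases Nat.lt_or_ge (x + 1) m with hlt | hge
      · exact ih hlt
      · left
        have h2 := pvScanA_le valido m (x + 1) (by omega)
        have h3 := pvScanA_ge valido m (x + 1)
        omega
  | case2 x hx h1 => rw [pvScanA, dif_pos hx, if_neg h1]; exact Or.inr h1
  | case3 x hx => omega

def pvColsBfrom (matrice : List (List Int)) (r_start r_end : Int) (valido : List Int) (m : Nat)
    (j : Nat) (st : Int × PySem.Dict String (List (List Int))) : Int × PySem.Dict String (List (List Int)) :=
  (PySem.List.pyRange ((j : Nat) : Int) ((m : Nat) : Int)).foldl (fun st c_start =>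
    (PySem.List.pyRange c_start ((m : Nat) : Int)).foldl (fun st c_end =>
      if (PySem.List.pyRange c_start (c_end + 1)).all
           (fun c => decide (PySem.List.pyGetD valido c 0 = 1))
      then pvEmitB matrice r_start r_end c_start c_end st else st) st) st

lemma pvColsA_eq_from (matrice : List (List Int)) (rs re : Int) (valido : List Int) (m : Nat)
    (h0 : 0 ≤ rs) (h1 : rs ≤ re + 1) (h2 : re < (matrice.length : Int)) :
    ∀ (j : Nat) (st : Int × PySem.Dict String (List (List Int))),
      pvColsA matrice rs re valido m j st = pvColsBfrom matrice rs re valido m j st := by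
  intro j st
  induction j, st using pvColsA.induct matrice rs re valido m with
  | case3 j st hj =>
      rw [pvColsA, dif_neg hj]
      unfold pvColsBfrom
      rw [PySem.List.pyRange_one_eq_nil (by exact_mod_cast Nat.le_of_not_lt hj)]
      rfl
  | case2 j st hj hv ih =>
      rw [pvColsA, dif_pos hj, dif_neg hv, ih]
      unfold pvColsBfrom
      conv_rhs => rw [PySem.List.pyRange_one_cons
        (show ((j : Nat) : Int) < ((m : Nat) : Int) by exact_mod_cast hj)]
      rw [List.foldl_cons, pvColsB_col_dead matrice rs re valido m j hv st]
      have hc : ((j : Nat) : Int) + 1 = (((j + 1 : Nat)) : Int) := by push_cast; ring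
      rw [hc]
  | case1 j st hj hv start j2 endd st2 ih =>
      rw [pvColsA, dif_pos hj, dif_pos hv]
      change pvColsA matrice rs re valido m j2 st2 = _
      rw [ih]
      show pvColsBfrom matrice rs re valido m (pvScanA valido m j)
          (List.foldl (fun st c_start => List.foldl
              (fun st c_end => pvEmitA matrice rs re c_start c_end st) st
              (PySem.List.pyRange c_start (((pvScanA valido m j - 1 : Nat) : Int) + 1)))
            st (PySem.List.pyRange ((j : Nat) : Int) (((pvScanA valido m j - 1 : Nat) : Int) + 1)))
        = pvColsBfrom matrice rs re valido m j st
      have hgt : j < pvScanA valido m j := pvScanA_gt valido m j hj hv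
      have hle : pvScanA valido m j ≤ m := pvScanA_le valido m j (le_of_lt hj)
      have hcast : ((pvScanA valido m j - 1 : Nat) : Int) + 1 = ((pvScanA valido m j : Nat) : Int) := by
        omega
      rw [hcast]
      unfold pvColsBfrom
      rw [PySem.List.pyRange_one_append ((j : Nat) : Int) ((pvScanA valido m j : Nat) : Int)
        ((m : Nat) : Int) (by exact_mod_cast le_of_lt hgt) (by exact_mod_cast hle), List.foldl_append]
      congr 1
      rw [PySem.List.foldl_congr_mem
        (PySem.List.pyRange ((j : Nat) : Int) ((pvScanA valido m j : Nat) : Int))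
        (fun st c_start => List.foldl (fun st c_end => pvEmitA matrice rs re c_start c_end st) st
          (PySem.List.pyRange c_start ((pvScanA valido m j : Nat) : Int)))
        (fun st cs => List.foldl (fun st ce => pvEmitB matrice rs re cs ce st) st
          (PySem.List.pyRange cs ((pvScanA valido m j : Nat) : Int)))
        st ?hAB]
      rw [PySem.List.foldl_congr_mem
        (PySem.List.pyRange ((j : Nat) : Int) ((pvScanA valido m j : Nat) : Int))
        (fun st c_start => List.foldl (fun st c_end =>
          if (PySem.List.pyRange c_start (c_end + 1)).all
               (fun c => decide (PySem.List.pyGetD valido c 0 = 1))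
          then pvEmitB matrice rs re c_start c_end st else st) st
          (PySem.List.pyRange c_start ((m : Nat) : Int)))
        (fun st cs => List.foldl (fun st ce => pvEmitB matrice rs re cs ce st) st
          (PySem.List.pyRange cs ((pvScanA valido m j : Nat) : Int)))
        st ?hseg]
      case hAB =>
        intro acc cs hcs
        beta_reduce
        exact PySem.List.foldl_congr_mem _ _ _ acc
          (fun a ce _ => pvEmit_eq matrice rs re cs ce a h0 h1 h2)
      case hseg =>
        intro acc cs hcs
        rw [PySem.List.mem_pyRange_one] at hcs
        beta_reduce
        exact pvColsB_col_run matrice rs re valido m j (pvScanA valido m j) cs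
          (pvScanA_ones valido m j) (pvScanA_stop valido m j hj) hle hcs.1 hcs.2 acc

lemma pvCols_eq (matrice : List (List Int)) (rs re : Int) (valido : List Int) (m : Nat)
    (h0 : 0 ≤ rs) (h1 : rs ≤ re + 1) (h2 : re < (matrice.length : Int))
    (st : Int × PySem.Dict String (List (List Int))) :
    pvColsA matrice rs re valido m 0 st = pvColsB matrice rs re valido m st := by
  rw [pvColsA_eq_from matrice rs re valido m h0 h1 h2 0 st]
  unfold pvColsBfrom pvColsB
  norm_num

-- ===== VERDICT (by name: the statement is the Claim_ definition above) =====
theorem enumerate_rect_better_spec : Claim_equal_enumerate_rect_better := by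
  intro matrice _ _
  unfold Spec_enumerate_rect_better enumerate_rect_better enumerate_rect_better_alt
  refine congrArg (fun r : Int × PySem.Dict String (List (List Int)) => (r.1, r.2.items)) ?_
  apply PySem.List.foldl_congr_mem
  intro st rs hrs
  rw [PySem.List.mem_pyRange_one] at hrs
  refine congrArg Prod.snd ?_
  apply PySem.List.foldl_congr_mem
  intro p re hre
  rw [PySem.List.mem_pyRange_one] at hre
  exact congrArg₂ Prod.mk rfl
    (pvCols_eq matrice rs re _ _ hrs.1 (by omega) (by omega) p.2)
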